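-- pv_equiv track=rewrite | github.com/spideyboy18/BEVADAT2022232 | HAZI/HAZI01/HAZI01.py | by_parity
-- ===== SOURCE A (Python) =====
-- def by_parity(input_list):
--     even = []
--     odd = []
--     for num in input_list:
--         if num % 2 == 0:
--             even.append(num)
--         else:
--             odd.append(num)
--     result = {'even': sorted(even), 'odd': sorted(odd)}
--     return result
-- ===== SOURCE B (Python) =====
-- def by_parity(input_list):
--     s = sorted(input_list)
--     return {'even': [n for n in s if n % 2 == 0],
--             'odd': [n for n in s if n % 2 != 0]}
-- ===== Notes on version B (the rewrite author's own statement) =====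
-- stated objective: simpler
-- what changed: B sorts the whole list once and then splits it with two parity comprehensions, instead of A's partition loop with two appends followed by two separate sorts.
import Mathlib
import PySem

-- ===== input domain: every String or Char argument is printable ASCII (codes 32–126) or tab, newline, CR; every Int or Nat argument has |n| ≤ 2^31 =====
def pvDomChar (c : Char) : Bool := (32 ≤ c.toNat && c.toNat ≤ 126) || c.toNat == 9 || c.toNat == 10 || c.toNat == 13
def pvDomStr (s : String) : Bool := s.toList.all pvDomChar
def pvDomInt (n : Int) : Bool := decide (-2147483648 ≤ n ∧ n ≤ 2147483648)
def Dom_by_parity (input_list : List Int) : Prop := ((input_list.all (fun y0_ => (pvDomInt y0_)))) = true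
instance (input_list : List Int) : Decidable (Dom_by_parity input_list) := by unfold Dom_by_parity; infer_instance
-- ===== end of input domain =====

-- B sorts the list once and splits it with two parity filters, instead of A's
-- partition loop followed by two separate sorts; same return value, simpler shape.


-- ===== PORT A =====
def by_parity (input_list : List Int) : List (String × List Int) :=
  let eo := input_list.foldl
    (fun (eo : List Int × List Int) num =>
      if PySem.Int.mod num 2 = 0 then (eo.1 ++ [num], eo.2) else (eo.1, eo.2 ++ [num]))
    ([], [])
  [("even", PySem.List.sorted eo.1 (fun x => x) false),
   ("odd", PySem.List.sorted eo.2 (fun x => x) false)]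

-- ===== PORT B =====
def by_parity_alt (input_list : List Int) : List (String × List Int) :=
  let s := PySem.List.sorted input_list (fun x => x) false
  [("even", s.filter (fun n => PySem.Int.mod n 2 == 0)),
   ("odd", s.filter (fun n => !(PySem.Int.mod n 2 == 0)))]

-- ===== PRECONDITION & SPEC =====
def Spec_by_parity (input_list : List Int) (out : List (String × List Int)) : Prop := out = by_parity_alt input_list
instance (input_list : List Int) (out : List (String × List Int)) : Decidable (Spec_by_parity input_list out) := by unfold Spec_by_parity; infer_instance

-- ===== CLAIM (what is proved, stated in full; the proofs are below) =====
def Claim_equal_by_parity : Prop := ∀ (input_list : List Int), Dom_by_parity input_list → Spec_by_parity input_list (by_parity input_list)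

-- ===== LEMMAS AND PROOFS =====

-- A's partition loop is two filters of the input (specific to A's loop body).
theorem by_parity_loop (l e o : List Int) :
    l.foldl
      (fun (eo : List Int × List Int) num =>
        if PySem.Int.mod num 2 = 0 then (eo.1 ++ [num], eo.2) else (eo.1, eo.2 ++ [num]))
      (e, o)
    = (e ++ l.filter (fun n => PySem.Int.mod n 2 == 0),
       o ++ l.filter (fun n => !(PySem.Int.mod n 2 == 0))) := by
  induction l generalizing e o with
  | nil => simp
  | cons x t ih =>
    rw [List.foldl_cons]
    by_cases h : PySem.Int.mod x 2 = 0
    · rw [if_pos h, ih]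
      simp only [List.filter_cons, h]
      simp
    · rw [if_neg h, ih]
      have hm : PySem.Int.mod x 2 = x % 2 := PySem.Int.mod_eq_emod_of_pos (a := x) (by norm_num)
      rw [hm] at h
      have h1 : x % 2 = 1 := by omega
      simp only [List.filter_cons, hm, h1]
      simp

-- sorting after filtering equals filtering the sorted list (p : parity test).
theorem sorted_filter (l : List Int) (p : Int → Bool) :
    PySem.List.sorted (l.filter p) (fun x => x) false
    = (PySem.List.sorted l (fun x => x) false).filter p := by
  apply PySem.List.sorted_id_eq_of_perm_of_pairwise
  · exact (PySem.List.sorted_perm l (fun x => x) false).filter p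
  · exact (PySem.List.sorted_pairwise l (fun x => x)).filter p

-- ===== VERDICT (by name: the statement is the Claim_ definition above) =====
theorem by_parity_spec : Claim_equal_by_parity := by
  intro l _
  show by_parity l = by_parity_alt l
  simp only [by_parity, by_parity_alt, by_parity_loop, List.nil_append]
  rw [sorted_filter, sorted_filter]
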